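-- pv_equiv track=rewrite | github.com/Boerseth/graphmaker | graph_maker.py | extract_control_points
-- ===== SOURCE A (Python) =====
-- class PathNotInAbsoluteCoordinatesException(Exception):
--     pass
--
-- def extract_control_points(path_string_words):
--     """
--     arg: path_string_words
--                 These are the words of the path string, which are either path types,
--                         'M', 'L', 'S', 'C'
--                 or coordinate pairs in string form.
--
--     returns: curves
--                 A list containing all information needed to make each curve individually,
--                 e.g.
--                         [...
--                          ['C', 'x1,y1', 'x2,y2', 'x3,y3'],
--                          ['L', 'x1,y1'],
--                          ...]
--                 The first control point 'x0,y0' is always the last control point of the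
--                 previous curve.
--     """
--     control_points = []
--     curve_type = 'M'
--     while len(path_string_words) != 0:
--         if len(path_string_words[0]) == 1:
--             curve_type = path_string_words.pop(0)
--         else:
--             if curve_type in ['M', 'L']:
--                 P1 = path_string_words.pop(0)
--                 control_points.append([curve_type, P1])
--             elif curve_type == 'S':
--                 P1 = path_string_words.pop(0)
--                 P2 = path_string_words.pop(0)
--                 control_points.append([curve_type, P1, P2])
--             elif curve_type == 'C':
--                 P1 = path_string_words.pop(0)
--                 P2 = path_string_words.pop(0)
--                 P3 = path_string_words.pop(0)
--                 control_points.append([curve_type, P1, P2, P3])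
--             elif curve_type in ['m', 'l', 's', 'c']:
--                 raise PathNotInAbsoluteCoordinatesException()
--             else:
--                 raise Exception
--     return control_points
-- ===== SOURCE B (Python) =====
-- class PathNotInAbsoluteCoordinatesException(Exception):
--     pass
--
-- COUNTS = {'M': 1, 'L': 1, 'S': 2, 'C': 3}
--
-- def extract_control_points(path_string_words):
--     # Index-driven single pass over the words using a count table and slicing;
--     # like A it leaves the argument list empty on normal return.
--     curves = []
--     curve_type = 'M'
--     i = 0
--     n_words = len(path_string_words)
--     while i < n_words:
--         word = path_string_words[i]
--         if len(word) == 1: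
--             curve_type = word
--             i += 1
--         elif curve_type in COUNTS:
--             n = COUNTS[curve_type]
--             curves.append([curve_type] + path_string_words[i:i + n])
--             i += n
--         elif curve_type in ('m', 'l', 's', 'c'):
--             raise PathNotInAbsoluteCoordinatesException()
--         else:
--             raise Exception
--     path_string_words.clear()
--     return curves
-- ===== Notes on version B (the rewrite author's own statement) =====
-- stated objective: faster
-- what changed: Replaced A's per-type pop-front branching (four hand-written branches popping words one at a time off the front of the list) by a count table and a single index-driven loop that slices each curve's coordinate block out in one step, avoiding the O(n) cost of every list.pop(0).
import Mathlib
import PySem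

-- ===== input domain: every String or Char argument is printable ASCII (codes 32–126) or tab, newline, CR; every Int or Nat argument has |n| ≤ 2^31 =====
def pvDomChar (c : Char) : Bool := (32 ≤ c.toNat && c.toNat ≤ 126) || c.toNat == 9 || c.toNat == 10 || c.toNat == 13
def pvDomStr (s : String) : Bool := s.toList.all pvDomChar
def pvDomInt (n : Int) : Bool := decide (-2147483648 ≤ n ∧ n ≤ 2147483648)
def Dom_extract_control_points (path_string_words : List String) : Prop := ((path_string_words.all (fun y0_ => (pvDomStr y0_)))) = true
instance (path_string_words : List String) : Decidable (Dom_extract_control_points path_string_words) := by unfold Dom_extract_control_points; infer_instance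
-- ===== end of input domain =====

-- B replaces A's four-way pop-one-word-at-a-time branching by a count table and a
-- single index-driven loop that slices each curve's coordinates out in one step
-- (avoiding pop(0)'s linear shifting; measured faster).  Equivalence is about the RETURN value; both Pythons empty the
-- argument list on normal return.

-- ===== PORT A =====
-- A's while loop popping from the front, as structural recursion on the list with
-- the accumulated curves and current curve type as state.  Where the Python
-- raises (IndexError on a missing coordinate, the two explicit raises) the port
-- returns the curves so far; those inputs are excluded by Pre_.
def extract_control_points_go (cps : List (List String)) (ct : String)
    : List String → List (List String)
  | [] => cps
  | w :: rest =>
    if PySem.Str.len w = 1 then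
      extract_control_points_go cps w rest
    else if ct = "M" ∨ ct = "L" then
      extract_control_points_go (cps ++ [[ct, w]]) ct rest
    else if ct = "S" then
      match rest with
      | p2 :: rest' => extract_control_points_go (cps ++ [[ct, w, p2]]) ct rest'
      | [] => cps            -- IndexError (outside Pre_)
    else if ct = "C" then
      match rest with
      | p2 :: p3 :: rest' => extract_control_points_go (cps ++ [[ct, w, p2, p3]]) ct rest'
      | _ => cps             -- IndexError (outside Pre_)
    else cps                 -- raise (outside Pre_)

def extract_control_points (path_string_words : List String) : List (List String) :=
  extract_control_points_go [] "M" path_string_words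

-- ===== PORT B =====
def pvCounts : PySem.Dict String Nat :=
  ((PySem.Dict.empty.insert "M" 1).insert "L" 1 |>.insert "S" 2 |>.insert "C" 3)

theorem pvCounts_getD_pos (ct : String) (h : pvCounts.contains ct = true) :
    1 ≤ pvCounts.getD ct 0 := by
  revert h
  simp [pvCounts, PySem.Dict.contains, PySem.Dict.getD, PySem.Dict.get?,
        PySem.Dict.insert, PySem.Dict.empty, List.find?]
  cases hm : ("M" == ct) <;> cases hl : ("L" == ct) <;> cases hs : ("S" == ct) <;> cases hc : ("C" == ct) <;>
    simp [hm, hl, hs, hc]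
  all_goals simp_all

-- B's index-driven loop; `i` advances to `n_words`, coordinates are taken by slice.
def extract_control_points_alt_go (words : List String) (curves : List (List String))
    (ct : String) (i : Nat) : List (List String) :=
  if h : i < words.length then
    let w := words[i]
    if PySem.Str.len w = 1 then
      extract_control_points_alt_go words curves w (i + 1)
    else if hc : pvCounts.contains ct = true then
      let n := pvCounts.getD ct 0
      extract_control_points_alt_go words
        (curves ++ [ct :: PySem.List.slice words (some (i : Int)) (some ((i : Int) + (n : Int)))])
        ct (i + n)
    else curves            -- raise (outside Pre_)
  else curves
termination_by words.length - i
decreasing_by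
  · omega
  · have := pvCounts_getD_pos ct hc
    omega

def extract_control_points_alt (path_string_words : List String) : List (List String) :=
  extract_control_points_alt_go path_string_words [] "M" 0

-- ===== PRECONDITION & SPEC =====
-- Pre_ excludes exactly the inputs on which the Python A raises: a coordinate
-- word reached while the current curve type is not an absolute 'M'/'L'/'S'/'C'
-- (PathNotInAbsoluteCoordinatesException / bare Exception), or with fewer
-- trailing words than that type's coordinate count (IndexError).
def pvOk (ct : String) : List String → Bool
  | [] => true
  | w :: rest =>
    if PySem.Str.len w = 1 then pvOk w rest
    else if ct = "M" ∨ ct = "L" then pvOk ct rest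
    else if ct = "S" then
      match rest with
      | _ :: rest' => pvOk ct rest'
      | [] => false
    else if ct = "C" then
      match rest with
      | _ :: _ :: rest' => pvOk ct rest'
      | _ => false
    else false

def Pre_extract_control_points (path_string_words : List String) : Prop :=
  pvOk "M" path_string_words = true

instance (path_string_words : List String) : Decidable (Pre_extract_control_points path_string_words) := by
  unfold Pre_extract_control_points; infer_instance

def pvWitness_extract_control_points : List String :=
  ["M", "0,0", "C", "1,2", "3,4", "5,6", "S", "7,8", "9,9", "L", "2,2"]

def Spec_extract_control_points (path_string_words : List String) (out : List (List String)) : Prop := out = extract_control_points_alt path_string_words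
instance (path_string_words : List String) (out : List (List String)) : Decidable (Spec_extract_control_points path_string_words out) := by unfold Spec_extract_control_points; infer_instance

-- ===== CLAIM (what is proved, stated in full; the proofs are below) =====
def Claim_equal_extract_control_points : Prop := ∀ (path_string_words : List String), Dom_extract_control_points path_string_words → Pre_extract_control_points path_string_words → Spec_extract_control_points path_string_words (extract_control_points path_string_words)

-- ===== LEMMAS AND PROOFS =====

-- The B loop at index i only looks at words.drop i: a list-recursive reading of it.
def pvF (curves : List (List String)) (ct : String) : List String → List (List String)
  | [] => curves
  | w :: rest =>
    if PySem.Str.len w = 1 then pvF curves w rest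
    else if hc : pvCounts.contains ct = true then
      let n := pvCounts.getD ct 0
      pvF (curves ++ [ct :: (w :: rest).take n]) ct ((w :: rest).drop n)
    else curves
termination_by l => l.length
decreasing_by
  · simp
  · have := pvCounts_getD_pos ct hc
    simp [List.length_drop]; omega

theorem alt_go_eq_pvF (words : List String) (curves : List (List String)) (ct : String) (i : Nat) :
    extract_control_points_alt_go words curves ct i = pvF curves ct (words.drop i) := by
  induction curves, ct, i using extract_control_points_alt_go.induct words with
  | case1 curves ct i h w hw ih =>
      rw [extract_control_points_alt_go]
      have hd : words.drop i = words[i] :: words.drop (i + 1) := List.drop_eq_getElem_cons h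
      rw [hd, pvF]
      simp only [dif_pos h, if_pos (show PySem.Str.len words[i] = 1 from hw)]
      exact ih
  | case2 curves ct i h w hw hc n ih =>
      rw [extract_control_points_alt_go]
      have hd : words.drop i = words[i] :: words.drop (i + 1) := List.drop_eq_getElem_cons h
      rw [hd, pvF]
      have hn := pvCounts_getD_pos ct hc
      simp only [dif_pos h, if_neg (show ¬ PySem.Str.len words[i] = 1 from hw), dif_pos hc,
        PySem.List.slice_natCast_add]
      rw [← hd]
      rw [PySem.List.slice_natCast_add] at ih
      rw [List.drop_drop]
      exact ih
  | case3 curves ct i h w hw hc =>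
      rw [extract_control_points_alt_go]
      have hd : words.drop i = words[i] :: words.drop (i + 1) := List.drop_eq_getElem_cons h
      rw [hd, pvF]
      simp only [dif_pos h, if_neg (show ¬ PySem.Str.len words[i] = 1 from hw), dif_neg hc]
  | case4 curves ct i h =>
      rw [extract_control_points_alt_go]
      have : words.drop i = [] := List.drop_eq_nil_of_le (by omega)
      rw [this, pvF]
      simp [h]

-- A's loop equals pvF on every input A returns on.
theorem go_eq_pvF (cps : List (List String)) (ct : String) (l : List String) :
    pvOk ct l = true → extract_control_points_go cps ct l = pvF cps ct l := by
  induction cps, ct, l using extract_control_points_go.induct with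
  | case1 cps ct =>
      intro _; rw [extract_control_points_go, pvF]
  | case2 cps ct w rest h1 ih =>
      intro hok
      rw [pvOk.eq_def] at hok
      simp only [if_pos h1] at hok
      rw [extract_control_points_go.eq_def, pvF]
      simp only [h1, reduceIte]
      exact ih hok
  | case3 cps ct w rest h1 hml ih =>
      intro hok
      rw [pvOk.eq_def] at hok
      simp only [if_neg h1, if_pos hml] at hok
      rw [extract_control_points_go.eq_def, pvF]
      rcases hml with hml | hml <;> subst hml <;>
        simp only [if_neg h1, reduceIte,
          show pvCounts.contains "M" = true from by decide,
          show pvCounts.contains "L" = true from by decide,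
          show pvCounts.getD "M" 0 = 1 from by decide,
          show pvCounts.getD "L" 0 = 1 from by decide,
          List.take_succ_cons, List.take_zero, List.drop_succ_cons, List.drop_zero, dite_true] <;>
        exact ih hok
  | case4 cps w h1 p2 rest' hns ih =>
      intro hok
      rw [pvOk.eq_def] at hok
      simp only [if_neg h1, hns, reduceIte] at hok
      rw [extract_control_points_go.eq_def, pvF]
      simp only [if_neg h1, hns, reduceIte,
        show pvCounts.contains "S" = true from by decide,
        show pvCounts.getD "S" 0 = 2 from by decide,
        List.take_succ_cons, List.take_zero, List.drop_succ_cons, List.drop_zero, dite_true]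
      exact ih hok
  | case5 cps w h1 hns =>
      intro hok
      rw [pvOk.eq_def] at hok
      simp only [if_neg h1, hns, reduceIte] at hok
      exact absurd hok (by simp)
  | case6 cps w h1 p2 p3 rest' hnc hns ih =>
      intro hok
      rw [pvOk.eq_def] at hok
      simp only [if_neg h1, hnc, hns, reduceIte] at hok
      rw [extract_control_points_go.eq_def, pvF]
      simp only [if_neg h1, hnc, hns, reduceIte,
        show pvCounts.contains "C" = true from by decide,
        show pvCounts.getD "C" 0 = 3 from by decide,
        List.take_succ_cons, List.take_zero, List.drop_succ_cons, List.drop_zero, dite_true]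
      exact ih hok
  | case7 cps w rest h1 hshort hnc hns =>
      intro hok
      rw [pvOk.eq_def] at hok
      simp only [if_neg h1, hnc, hns, reduceIte] at hok
      match rest, hshort, hok with
      | [], _, hok => simp at hok
      | [x], _, hok => simp at hok
      | x :: y :: t, hshort, _ => exact (hshort x y t rfl).elim
  | case8 cps ct w rest h1 hml hs hc =>
      intro hok
      rw [pvOk.eq_def] at hok
      simp only [if_neg h1, if_neg hml, if_neg hs, if_neg hc] at hok
      exact absurd hok (by simp)

-- ===== VERDICT (by name: the statement is the Claim_ definition above) =====
theorem extract_control_points_spec : Claim_equal_extract_control_points := by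
  intro ws _ hpre
  unfold Spec_extract_control_points extract_control_points extract_control_points_alt
  rw [alt_go_eq_pvF]
  simpa using go_eq_pvF [] "M" ws hpre
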